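-- pv_equiv track=rewrite | github.com/pers0n4/problem-solving | programmers/42584.py | solution
-- ===== SOURCE A (Python) =====
-- def solution(prices: list[int]):
--     answer = [0] * len(prices)
--     for i, past in enumerate(prices):
--         for j in range(i + 1, len(prices)):
--             answer[i] += 1
--             if past > prices[j]:
--                 break
--     return answer
-- ===== SOURCE B (Python) =====
-- def solution(prices: list[int]):
--     n = len(prices)
--     answer = [0] * n
--     stack = []  # indices whose price has not dropped yet (prices non-decreasing bottom->top)
--     for j, p in enumerate(prices):
--         while stack and prices[stack[-1]] > p:
--             i = stack.pop()
--             answer[i] = j - i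
--         stack.append(j)
--     for i in stack:
--         answer[i] = n - 1 - i
--     return answer
-- ===== Notes on version B (the rewrite author's own statement) =====
-- stated objective: faster
-- what changed: Replaces the per-index rescan of the remaining suffix by a single left-to-right pass with a monotonic stack of not-yet-dropped indices, each index pushed and popped once.
import Mathlib
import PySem

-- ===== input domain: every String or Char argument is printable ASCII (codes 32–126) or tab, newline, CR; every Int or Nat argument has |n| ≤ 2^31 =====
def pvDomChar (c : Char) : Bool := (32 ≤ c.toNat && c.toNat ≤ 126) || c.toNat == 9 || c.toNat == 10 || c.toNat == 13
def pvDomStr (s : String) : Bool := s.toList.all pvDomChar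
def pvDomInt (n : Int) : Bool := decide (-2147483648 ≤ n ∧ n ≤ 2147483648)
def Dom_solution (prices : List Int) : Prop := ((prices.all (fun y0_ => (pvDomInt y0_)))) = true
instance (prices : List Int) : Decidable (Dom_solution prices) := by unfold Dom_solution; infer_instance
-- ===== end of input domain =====

-- B replaces A's O(n^2) rescans by one pass with a monotonic stack (asymptotically faster); return values proved equal.

-- ===== PORT A =====
-- inner loop of A: walk the suffix prices[i+1:], counting 1 per step, stopping after the first price below `past`
def solInner (past : Int) : List Int → Int
  | [] => 0
  | q :: rest => 1 + (if past > q then 0 else solInner past rest)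

def solution (prices : List Int) : List Int :=
  (PySem.List.enumerate prices).map (fun ip => solInner ip.2 (prices.drop (ip.1.toNat + 1)))

-- ===== PORT B =====
-- while stack and prices[stack[-1]] > p: i = stack.pop(); answer[i] = j - i   (stack head = top)
def popLoop (prices : List Int) (j : Nat) (p : Int) : List Int → List Nat → List Int × List Nat
  | ans, [] => (ans, [])
  | ans, i :: rest =>
      if prices.getD i 0 > p then popLoop prices j p (ans.set i ((j : Int) - (i : Int))) rest
      else (ans, i :: rest)

def solution_alt (prices : List Int) : List Int :=
  let n := prices.length
  let s := (PySem.List.enumerate prices).foldl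
      (fun (s : List Int × List Nat) (jp : Int × Int) =>
        let r := popLoop prices jp.1.toNat jp.2 s.1 s.2
        (r.1, jp.1.toNat :: r.2))
      (List.replicate n 0, [])
  -- for i in stack: answer[i] = n - 1 - i   (python iterates bottom→top, hence .reverse)
  s.2.reverse.foldl (fun a i => a.set i ((n : Int) - 1 - (i : Int))) s.1

-- ===== PRECONDITION & SPEC =====
def Spec_solution (prices : List Int) (out : List Int) : Prop := out = solution_alt prices
instance (prices : List Int) (out : List Int) : Decidable (Spec_solution prices out) := by unfold Spec_solution; infer_instance

-- ===== CLAIM (what is proved, stated in full; the proofs are below) =====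
def Claim_equal_solution : Prop := ∀ (prices : List Int), Dom_solution prices → Spec_solution prices (solution prices)

-- ===== LEMMAS AND PROOFS =====

-- target value of entry i, phrased through A's inner loop
def tgt (prices : List Int) (i : Nat) : Int := solInner (prices.getD i 0) (prices.drop (i + 1))

-- "price at i has not dropped anywhere in (i, j)"
def Alive (prices : List Int) (i j : Nat) : Prop :=
  ∀ k, i < k → k < j → prices.getD i 0 ≤ prices.getD k 0

-- loop invariant of B's main pass after processing indices < j
def BInv (prices : List Int) (j : Nat) (s : List Int × List Nat) : Prop :=
  s.1.length = prices.length ∧ j ≤ prices.length ∧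
  s.2.Pairwise (· > ·) ∧
  (∀ i ∈ s.2, i < j ∧ Alive prices i j) ∧
  (∀ i, i < j → i ∉ s.2 → s.1.getD i 0 = tgt prices i)

theorem solInner_found (past : Int) (l1 : List Int) (q : Int) (l2 : List Int)
    (h1 : ∀ x ∈ l1, ¬ past > x) (hq : past > q) :
    solInner past (l1 ++ q :: l2) = (l1.length : Int) + 1 := by
  induction l1 with
  | nil => simp [solInner, hq]
  | cons x l1 ih =>
    have hx := h1 x (by simp)
    simp only [List.cons_append, solInner, if_neg hx,
      ih (fun y hy => h1 y (by simp [hy])), List.length_cons]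
    push_cast; ring

theorem solInner_all (past : Int) (l : List Int) (h : ∀ x ∈ l, ¬ past > x) :
    solInner past l = (l.length : Int) := by
  induction l with
  | nil => simp [solInner]
  | cons x l ih =>
    have hx := h x (by simp)
    simp only [solInner, if_neg hx, ih (fun y hy => h y (by simp [hy])), List.length_cons]
    push_cast; ring

theorem tgt_found (prices : List Int) (i j : Nat) (hij : i < j) (hjn : j < prices.length)
    (halive : Alive prices i j) (hdrop : prices.getD i 0 > prices.getD j 0) :
    tgt prices i = (j : Int) - (i : Int) := by
  unfold tgt
  set l' := prices.drop (i + 1) with hl'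
  have hlen : l'.length = prices.length - (i + 1) := by simp [hl']
  have hm : j - (i + 1) ≤ l'.length := by omega
  have hdm : l'.drop (j - (i + 1)) = prices.drop j := by
    rw [hl', List.drop_drop]; congr 1; omega
  have hdj : prices.drop j = prices[j] :: prices.drop (j + 1) := List.drop_eq_getElem_cons hjn
  have hsplit : l' = l'.take (j - (i + 1)) ++ prices[j] :: prices.drop (j + 1) := by
    conv_lhs => rw [← List.take_append_drop (j - (i + 1)) l']
    rw [hdm, hdj]
  have h1 : ∀ x ∈ l'.take (j - (i + 1)), ¬ prices.getD i 0 > x := by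
    intro x hx
    obtain ⟨t, ht, rfl⟩ := List.mem_iff_getElem.1 hx
    have ht' : t < j - (i + 1) := by
      have := ht; rw [List.length_take] at this; omega
    have hidx : i + 1 + t < prices.length := by omega
    have hval : (l'.take (j - (i + 1)))[t] = prices[i + 1 + t] := by
      simp [hl', List.getElem_take, List.getElem_drop]
    rw [hval]
    have h2 := halive (i + 1 + t) (by omega) (by omega)
    rw [List.getD_eq_getElem prices 0 hidx] at h2
    omega
  have hq : prices.getD i 0 > prices[j] := by
    rwa [List.getD_eq_getElem prices 0 hjn] at hdrop
  rw [hsplit, solInner_found _ _ _ _ h1 hq, List.length_take]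
  omega

theorem tgt_none (prices : List Int) (i : Nat) (hin : i < prices.length)
    (halive : Alive prices i prices.length) :
    tgt prices i = (prices.length : Int) - 1 - (i : Int) := by
  unfold tgt
  have h : ∀ x ∈ prices.drop (i + 1), ¬ prices.getD i 0 > x := by
    intro x hx
    obtain ⟨t, ht, rfl⟩ := List.mem_iff_getElem.1 hx
    have ht' : i + 1 + t < prices.length := by
      rw [List.length_drop] at ht; omega
    have hval : (prices.drop (i + 1))[t] = prices[i + 1 + t] := List.getElem_drop ..
    rw [hval]
    have h2 := halive (i + 1 + t) (by omega) ht'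
    rw [List.getD_eq_getElem prices 0 ht'] at h2
    omega
  rw [solInner_all _ _ h, List.length_drop]
  omega

theorem getD_set_self (l : List Int) (n : Nat) (v : Int) (h : n < l.length) :
    (l.set n v).getD n 0 = v := by
  simp [List.getD_eq_getElem?_getD, h]

theorem getD_set_ne (l : List Int) (m n : Nat) (v : Int) (h : m ≠ n) :
    (l.set m v).getD n 0 = l.getD n 0 := by
  simp [List.getD_eq_getElem?_getD, List.getElem?_set_ne h]

theorem popLoop_spec (prices : List Int) (j : Nat) (hj : j < prices.length)
    (st : List Nat) (ans : List Int)
    (hpw : st.Pairwise (· > ·))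
    (hst : ∀ i ∈ st, i < j ∧ Alive prices i j)
    (hans : ∀ i, i < j → i ∉ st → ans.getD i 0 = tgt prices i)
    (hlen : ans.length = prices.length) :
    (popLoop prices j (prices.getD j 0) ans st).1.length = prices.length ∧
    (popLoop prices j (prices.getD j 0) ans st).2 <:+ st ∧
    (∀ i, i < j → i ∉ (popLoop prices j (prices.getD j 0) ans st).2 →
        (popLoop prices j (prices.getD j 0) ans st).1.getD i 0 = tgt prices i) ∧
    (∀ i ∈ (popLoop prices j (prices.getD j 0) ans st).2,
        prices.getD i 0 ≤ prices.getD j 0) := by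
  induction st generalizing ans with
  | nil =>
    simp only [popLoop]
    exact ⟨hlen, List.suffix_refl _, fun i hi _ => hans i hi (by simp), by simp⟩
  | cons h rest ih =>
    simp only [popLoop]
    by_cases hc : prices.getD h 0 > prices.getD j 0
    · rw [if_pos hc]
      have hh := hst h (by simp)
      have htgt : tgt prices h = (j : Int) - (h : Int) := tgt_found prices h j hh.1 hj hh.2 hc
      have hpw' := List.pairwise_cons.1 hpw
      have hans2 : ∀ i, i < j → i ∉ rest →
          (ans.set h ((j : Int) - (h : Int))).getD i 0 = tgt prices i := by
        intro i hi hmem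
        by_cases hih : i = h
        · subst hih; rw [getD_set_self _ _ _ (by omega), htgt]
        · rw [getD_set_ne _ _ _ _ (fun he => hih he.symm)]
          exact hans i hi (by simp [hih, hmem])
      have hrec := ih (ans.set h ((j : Int) - (h : Int))) hpw'.2
        (fun i hi => hst i (by simp [hi])) hans2 (by simp [hlen])
      exact ⟨hrec.1, hrec.2.1.trans (List.suffix_cons h rest), hrec.2.2.1, hrec.2.2.2⟩
    · rw [if_neg hc]
      refine ⟨hlen, List.suffix_refl _, fun i hi hmem => hans i hi hmem, ?_⟩
      intro i hi
      rcases List.mem_cons.1 hi with rfl | hir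
      · omega
      · have hih : h > i := (List.pairwise_cons.1 hpw).1 i hir
        have hi' := hst i (by simp [hir])
        have hhj := (hst h (by simp)).1
        have hle : prices.getD i 0 ≤ prices.getD h 0 := hi'.2 h hih hhj
        omega

theorem step_inv (prices : List Int) (j : Nat) (hj : j < prices.length)
    (s : List Int × List Nat) (hInv : BInv prices j s) :
    BInv prices (j + 1)
      ((popLoop prices j (prices.getD j 0) s.1 s.2).1,
       j :: (popLoop prices j (prices.getD j 0) s.1 s.2).2) := by
  obtain ⟨hlen, hjle, hpw, hst, hans⟩ := hInv
  have P := popLoop_spec prices j hj s.2 s.1 hpw hst hans hlen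
  unfold BInv
  refine ⟨P.1, by omega, ?_, ?_, ?_⟩
  · rw [List.pairwise_cons]
    exact ⟨fun i hi => (hst i (P.2.1.subset hi)).1, List.Pairwise.sublist P.2.1.sublist hpw⟩
  · intro i hi
    rcases List.mem_cons.1 hi with rfl | hir
    · exact ⟨by omega, fun k hk1 hk2 => by omega⟩
    · have him := P.2.1.subset hir
      refine ⟨by have := (hst i him).1; omega, ?_⟩
      intro k hk1 hk2
      by_cases hkj : k = j
      · subst hkj; exact P.2.2.2 i hir
      · exact (hst i him).2 k hk1 (by omega)
  · intro i hi hmem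
    have hij : i ≠ j := fun he => hmem (by simp [he])
    exact P.2.2.1 i (by omega) (fun hr => hmem (List.mem_cons_of_mem _ hr))

theorem main_loop (prices : List Int) (suffix : List Int) :
    ∀ (j : Nat) (s : List Int × List Nat), prices.drop j = suffix → BInv prices j s →
    BInv prices prices.length
      ((PySem.List.enumerate suffix (j : Int)).foldl
        (fun (s : List Int × List Nat) (jp : Int × Int) =>
          let r := popLoop prices jp.1.toNat jp.2 s.1 s.2
          (r.1, jp.1.toNat :: r.2)) s) := by
  induction suffix with
  | nil =>
    intro j s hdrop hInv
    have hlen := congrArg List.length hdrop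
    simp only [List.length_drop, List.length_nil] at hlen
    have hj : j = prices.length := by have := hInv.2.1; omega
    subst hj
    simpa [PySem.List.enumerate_nil] using hInv
  | cons x rest ih =>
    intro j s hdrop hInv
    have hlen := congrArg List.length hdrop
    simp only [List.length_drop, List.length_cons] at hlen
    have hj : j < prices.length := by omega
    have hx : prices.getD j 0 = x := by
      have h0 : (prices.drop j)[0]'(by rw [hdrop]; simp) = prices[j] := by
        simp
      rw [List.getD_eq_getElem prices 0 hj, ← h0]
      simp [hdrop]
    have hrest : prices.drop (j + 1) = rest := by
      have h1 := congrArg List.tail hdrop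
      rwa [← List.drop_one, List.drop_drop, List.tail_cons] at h1
    rw [PySem.List.enumerate_cons, List.foldl_cons]
    have hstep := step_inv prices j hj s hInv
    show BInv prices prices.length
      (List.foldl
        (fun (s : List Int × List Nat) (jp : Int × Int) =>
          let r := popLoop prices jp.1.toNat jp.2 s.1 s.2
          (r.1, jp.1.toNat :: r.2))
        ((popLoop prices ((j : Int)).toNat x s.1 s.2).1,
         ((j : Int)).toNat :: (popLoop prices ((j : Int)).toNat x s.1 s.2).2)
        (PySem.List.enumerate rest ((j : Int) + 1)))
    have e1 : ((j : Int)).toNat = j := by simp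
    have hcast : ((j : Int) + 1) = (((j + 1 : Nat)) : Int) := by push_cast; ring
    rw [e1, ← hx, hcast]
    exact ih (j + 1) _ hrest hstep

theorem final_sets (prices : List Int) (st : List Nat) :
    ∀ (ans : List Int), st.Nodup →
    (∀ i ∈ st, i < prices.length ∧ tgt prices i = (prices.length : Int) - 1 - (i : Int)) →
    (∀ i, i < prices.length → i ∉ st → ans.getD i 0 = tgt prices i) →
    ans.length = prices.length →
    (st.foldl (fun a i => a.set i ((prices.length : Int) - 1 - (i : Int))) ans).length = prices.length ∧
    (∀ i, i < prices.length →
      (st.foldl (fun a i => a.set i ((prices.length : Int) - 1 - (i : Int))) ans).getD i 0 = tgt prices i) := by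
  induction st with
  | nil =>
    intro ans _ _ hans hlen
    exact ⟨hlen, fun i hi => hans i hi (by simp)⟩
  | cons h rest ih =>
    intro ans hnd hset hans hlen
    rw [List.foldl_cons]
    have hh := hset h (by simp)
    refine ih (ans.set h ((prices.length : Int) - 1 - (h : Int))) hnd.of_cons
      (fun i hi => hset i (List.mem_cons_of_mem _ hi)) ?_ (by simp [hlen])
    intro i hi hmem
    by_cases hih : i = h
    · subst hih
      rw [getD_set_self _ _ _ (by omega), hh.2]
    · rw [getD_set_ne _ _ _ _ (fun he => hih he.symm)]
      exact hans i hi (by simp [hih, hmem])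

theorem alt_eq (prices : List Int) :
    solution_alt prices = (List.range prices.length).map (tgt prices) := by
  show (let n := prices.length
      let s := (PySem.List.enumerate prices).foldl
        (fun (s : List Int × List Nat) (jp : Int × Int) =>
          let r := popLoop prices jp.1.toNat jp.2 s.1 s.2
          (r.1, jp.1.toNat :: r.2))
        (List.replicate n 0, [])
      s.2.reverse.foldl (fun a i => a.set i ((n : Int) - 1 - (i : Int))) s.1)
    = (List.range prices.length).map (tgt prices)
  simp only []
  have hinit : BInv prices 0 (List.replicate prices.length 0, []) :=
    ⟨by simp, Nat.zero_le _, List.Pairwise.nil, by simp, fun i hi hm => absurd hi (Nat.not_lt_zero i)⟩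
  have hmain := main_loop prices prices 0 (List.replicate prices.length 0, [])
    List.drop_zero hinit
  simp only [Nat.cast_zero] at hmain
  set sf := List.foldl
      (fun (s : List Int × List Nat) (jp : Int × Int) =>
        let r := popLoop prices jp.1.toNat jp.2 s.1 s.2
        (r.1, jp.1.toNat :: r.2))
      (List.replicate prices.length 0, [])
      (PySem.List.enumerate prices 0) with hsfdef
  obtain ⟨hl, -, hpw, hst, hans⟩ := hmain
  have hnd : sf.2.reverse.Nodup :=
    List.nodup_reverse.2 (hpw.imp (fun h => Nat.ne_of_gt h))
  have hsetm : ∀ i ∈ sf.2.reverse, i < prices.length ∧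
      tgt prices i = (prices.length : Int) - 1 - (i : Int) := by
    intro i hi
    rw [List.mem_reverse] at hi
    have h := hst i hi
    exact ⟨h.1, tgt_none prices i h.1 h.2⟩
  have hfin := final_sets prices sf.2.reverse sf.1 hnd hsetm
    (fun i hi hm => hans i hi (fun h => hm (List.mem_reverse.2 h))) hl
  apply List.ext_getElem
  · rw [hfin.1]; simp
  · intro k h1 h2
    have hk : k < prices.length := by simpa using h2
    have hg := hfin.2 k hk
    rw [List.getD_eq_getElem _ 0 h1] at hg
    rw [hg]
    simp [tgt]

theorem a_eq (prices : List Int) :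
    solution prices = (List.range prices.length).map (tgt prices) := by
  apply List.ext_getElem
  · simp [solution]
  · intro k h1 h2
    have hk : k < prices.length := by simpa using h2
    simp only [solution, List.getElem_map, PySem.List.getElem_enumerate,
      List.getElem_range, tgt]
    have ht : ((0 : Int) + (k : Nat)).toNat = k := by simp
    rw [ht, List.getD_eq_getElem prices 0 hk]

-- ===== VERDICT (by name: the statement is the Claim_ definition above) =====
theorem solution_spec : Claim_equal_solution := by
  intro prices _
  unfold Spec_solution
  rw [a_eq, alt_eq]
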